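-- pv_equiv track=rewrite | github.com/min19828257/AirGuitar | music_check.py | music
-- ===== SOURCE A (Python) =====
-- def music(rx,ry,x,y):       # 받아오는 왼손 좌표값
--     num1 = 0
--     num2 = 7
--     for i in range(rx, rx+18, 3):
--         num1 += 1
--         num2 += 1
--         if(x >= rx-7) & (x <= rx-3):        # 높은음
--             if(y >= i-1) & (y <= i+1):
--                 return num1
--         elif(x >= rx-12) & (x <= rx-8):     # 낮은음
--             if(y >= i-1) & (y <= i+1):
--                 return num1
-- ===== SOURCE B (Python) =====
-- def music(rx, ry, x, y):
--     # closed-form note index instead of scanning the six bands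
--     if not (rx - 7 <= x <= rx - 3 or rx - 12 <= x <= rx - 8):
--         return None
--     k = (y - rx + 1) // 3 + 1
--     return k if 1 <= k <= 6 else None
-- ===== Notes on version B (the rewrite author's own statement) =====
-- stated objective: simpler
-- what changed: Replaced the 6-iteration scan over range(rx, rx+18, 3) with a direct closed-form note index k = (y-rx+1)//3 + 1 guarded by the x-band test and 1<=k<=6.
import Mathlib
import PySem

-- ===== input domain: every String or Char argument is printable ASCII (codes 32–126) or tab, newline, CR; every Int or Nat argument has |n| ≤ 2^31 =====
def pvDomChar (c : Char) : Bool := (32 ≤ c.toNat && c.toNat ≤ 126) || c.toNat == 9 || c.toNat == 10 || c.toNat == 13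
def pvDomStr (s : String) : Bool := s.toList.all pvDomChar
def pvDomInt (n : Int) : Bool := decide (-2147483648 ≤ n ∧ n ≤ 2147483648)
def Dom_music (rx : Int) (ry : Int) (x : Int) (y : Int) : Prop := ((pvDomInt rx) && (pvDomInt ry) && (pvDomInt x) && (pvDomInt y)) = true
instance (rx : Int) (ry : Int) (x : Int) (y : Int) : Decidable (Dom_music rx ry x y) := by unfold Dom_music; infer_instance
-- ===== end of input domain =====

-- B replaces A's six-iteration band scan by a closed-form floor-division note index; objective: simpler. Proved equal on the whole domain.


-- ===== PORT A =====
-- A's for-loop over range(rx, rx+18, 3), carrying num1 and num2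
def musicLoop (rx : Int) (x : Int) (y : Int) (num1 : Int) (num2 : Int) : List Int → Option Int
  | [] => none
  | i :: rest =>
    let num1 := num1 + 1
    let num2 := num2 + 1
    if x ≥ rx - 7 ∧ x ≤ rx - 3 then
      (if y ≥ i - 1 ∧ y ≤ i + 1 then some num1 else musicLoop rx x y num1 num2 rest)
    else if x ≥ rx - 12 ∧ x ≤ rx - 8 then
      (if y ≥ i - 1 ∧ y ≤ i + 1 then some num1 else musicLoop rx x y num1 num2 rest)
    else musicLoop rx x y num1 num2 rest

def music (rx : Int) (ry : Int) (x : Int) (y : Int) : Option Int :=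
  musicLoop rx x y 0 7 (PySem.List.pyRange rx (rx + 18) 3)

-- ===== PORT B =====
def music_alt (rx : Int) (ry : Int) (x : Int) (y : Int) : Option Int :=
  if (rx - 7 ≤ x ∧ x ≤ rx - 3) ∨ (rx - 12 ≤ x ∧ x ≤ rx - 8) then
    let k := PySem.Int.floordiv (y - rx + 1) 3 + 1
    if 1 ≤ k ∧ k ≤ 6 then some k else none
  else none

-- ===== PRECONDITION & SPEC =====
def Spec_music (rx : Int) (ry : Int) (x : Int) (y : Int) (out : Option Int) : Prop := out = music_alt rx ry x y
instance (rx : Int) (ry : Int) (x : Int) (y : Int) (out : Option Int) : Decidable (Spec_music rx ry x y out) := by unfold Spec_music; infer_instance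

-- ===== CLAIM (what is proved, stated in full; the proofs are below) =====
def Claim_equal_music : Prop := ∀ (rx : Int) (ry : Int) (x : Int) (y : Int), Dom_music rx ry x y → Spec_music rx ry x y (music rx ry x y)

-- ===== LEMMAS AND PROOFS =====
theorem pyRange_rx18 (a : Int) :
    PySem.List.pyRange a (a + 18) 3 = [a, a + 3, a + 6, a + 9, a + 12, a + 15] := by
  rw [PySem.List.pyRange_of_pos a (a + 18) (by norm_num : (0:Int) < 3)]
  have h : a < a + 18 := by omega
  simp [h]
  norm_num [List.range_succ]

theorem musicLoop_cons (rx x y n1 n2 i : Int) (rest : List Int) :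
    musicLoop rx x y n1 n2 (i :: rest) =
      (if x ≥ rx - 7 ∧ x ≤ rx - 3 then
        (if y ≥ i - 1 ∧ y ≤ i + 1 then some (n1+1) else musicLoop rx x y (n1+1) (n2+1) rest)
      else if x ≥ rx - 12 ∧ x ≤ rx - 8 then
        (if y ≥ i - 1 ∧ y ≤ i + 1 then some (n1+1) else musicLoop rx x y (n1+1) (n2+1) rest)
      else musicLoop rx x y (n1+1) (n2+1) rest) := rfl

theorem musicLoop_hit (rx x y n1 n2 i : Int) (rest : List Int)
    (hx : (rx - 7 ≤ x ∧ x ≤ rx - 3) ∨ (rx - 12 ≤ x ∧ x ≤ rx - 8)) :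
    musicLoop rx x y n1 n2 (i :: rest) =
      (if y ≥ i - 1 ∧ y ≤ i + 1 then some (n1+1) else musicLoop rx x y (n1+1) (n2+1) rest) := by
  rw [musicLoop_cons]
  rcases hx with h | h
  · rw [if_pos (by omega : x ≥ rx - 7 ∧ x ≤ rx - 3)]
  · rw [if_neg (by omega : ¬(x ≥ rx - 7 ∧ x ≤ rx - 3)), if_pos (by omega : x ≥ rx - 12 ∧ x ≤ rx - 8)]

theorem musicLoop_miss (rx x y : Int) (l : List Int) (n1 n2 : Int)
    (hx : ¬((rx - 7 ≤ x ∧ x ≤ rx - 3) ∨ (rx - 12 ≤ x ∧ x ≤ rx - 8))) :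
    musicLoop rx x y n1 n2 l = none := by
  induction l generalizing n1 n2 with
  | nil => rfl
  | cons i rest ih =>
    rw [musicLoop_cons, if_neg (by omega : ¬(x ≥ rx - 7 ∧ x ≤ rx - 3)),
        if_neg (by omega : ¬(x ≥ rx - 12 ∧ x ≤ rx - 8))]
    exact ih (n1+1) (n2+1)

theorem music_eq_alt (rx ry x y : Int) : music rx ry x y = music_alt rx ry x y := by
  unfold music music_alt
  rw [pyRange_rx18]
  have hfd : PySem.Int.floordiv (y - rx + 1) 3 = (y - rx + 1) / 3 := by
    simp [PySem.Int.floordiv, Int.fdiv_eq_ediv]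
  by_cases hx : (rx - 7 ≤ x ∧ x ≤ rx - 3) ∨ (rx - 12 ≤ x ∧ x ≤ rx - 8)
  · rw [if_pos hx]
    simp only [musicLoop_hit _ _ _ _ _ _ _ hx, hfd]
    split_ifs <;> first
      | rfl
      | (simp only [Option.some.injEq]; omega)
      | (exfalso; omega)
  · rw [if_neg hx, musicLoop_miss _ _ _ _ _ _ hx]

-- ===== VERDICT (by name: the statement is the Claim_ definition above) =====
theorem music_spec : Claim_equal_music := by
  intro rx ry x y _
  exact music_eq_alt rx ry x y
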